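-- pv_equiv track=rewrite | github.com/PPS-phoenix/tal | reviewAnalyser.py | calculate_occs_words
-- ===== SOURCE A (Python) =====
-- def calculate_occs_words(train, smoothing=1):
--     class2word2occs = {"bad" : {}, "good" : {}}
--     for example, goldclass in train:
--         for word in set(example):
--             if word not in class2word2occs["bad"]:
--                 class2word2occs["bad"][word] = smoothing
--                 class2word2occs["good"][word] = smoothing
--             class2word2occs[goldclass][word] += 1
--     return class2word2occs
-- ===== SOURCE B (Python) =====
-- def calculate_occs_words(train, smoothing=1):
--     # Pass 1: ordered vocabulary of every distinct word seen in any example.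
--     vocab = []
--     seen = set()
--     for example, _goldclass in train:
--         for word in set(example):
--             if word not in seen:
--                 seen.add(word)
--                 vocab.append(word)
--     # One independent counting pass per class: for each word, the number of
--     # examples of that class it occurs in, plus the smoothing value.
--     result = {}
--     for cls in ("bad", "good"):
--         counts = {}
--         for example, goldclass in train:
--             if goldclass == cls:
--                 for word in set(example):
--                     counts[word] = counts.get(word, 0) + 1
--         result[cls] = {w: smoothing + counts.get(w, 0) for w in vocab}
--     return result
-- ===== Notes on version B (the rewrite author's own statement) =====
-- stated objective: alternative
-- what changed: B replaces A's single pass that lazily initialises and updates a shared dict-of-dicts by three independent stages: build the ordered global vocabulary, then for each class build its own occurrence counter over train, and finally assemble each class dict as {word: smoothing + count} over the vocabulary; A instead mutates both class dicts word by word inside one interleaved loop.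
import Mathlib
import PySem

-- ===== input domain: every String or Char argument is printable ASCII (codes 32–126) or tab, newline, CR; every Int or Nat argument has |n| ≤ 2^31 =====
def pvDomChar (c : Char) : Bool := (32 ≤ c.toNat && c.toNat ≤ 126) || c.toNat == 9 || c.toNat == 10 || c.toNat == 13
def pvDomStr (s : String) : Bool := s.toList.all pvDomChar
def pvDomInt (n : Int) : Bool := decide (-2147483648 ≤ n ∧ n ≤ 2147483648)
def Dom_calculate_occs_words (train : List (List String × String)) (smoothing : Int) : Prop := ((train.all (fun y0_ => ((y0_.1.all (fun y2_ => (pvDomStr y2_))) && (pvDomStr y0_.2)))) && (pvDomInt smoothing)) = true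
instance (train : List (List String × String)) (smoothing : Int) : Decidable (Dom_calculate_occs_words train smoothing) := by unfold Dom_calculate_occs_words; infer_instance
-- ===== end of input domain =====

-- B replaces A's single interleaved pass over a shared dict-of-dicts by three independent
-- stages (vocabulary, per-class counting, assembly); same return value on Pre_ (where A
-- does not raise KeyError); objective: alternative decomposition, not speed.

-- ===== PORT A =====
-- body of A's inner 'for word in set(example)' loop (the dict 'o' is class2word2occs)
def pvAword (smoothing : Int) (gc : String)
    (o : PySem.Dict String (PySem.Dict String Int)) (word : String) :
    PySem.Dict String (PySem.Dict String Int) :=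
  let o :=
    if (o.getD "bad" PySem.Dict.empty).contains word then o
    else
      let o := o.insert "bad" ((o.getD "bad" PySem.Dict.empty).insert word smoothing)
      o.insert "good" ((o.getD "good" PySem.Dict.empty).insert word smoothing)
  -- class2word2occs[goldclass][word] += 1  (goldclass missing = KeyError, excluded by Pre_)
  o.insert gc ((o.getD gc PySem.Dict.empty).modify word 0 (· + 1))

def pvAex (smoothing : Int) (o : PySem.Dict String (PySem.Dict String Int))
    (p : List String × String) : PySem.Dict String (PySem.Dict String Int) :=
  (PySem.Set.ofList p.1).foldl (pvAword smoothing p.2) o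

def calculate_occs_words (train : List (List String × String)) (smoothing : Int) :
    List (String × List (String × Int)) :=
  let d := train.foldl (pvAex smoothing)
    ((PySem.Dict.empty.insert "bad" PySem.Dict.empty).insert "good"
      (PySem.Dict.empty : PySem.Dict String Int))
  d.items.map (fun q => (q.1, q.2.items))

-- ===== PORT B =====
-- pass-1 body: if word not in seen: seen.add(word); vocab.append(word)   (acc = (vocab, seen))
def pvVocStep (acc : List String × PySem.Set String) (word : String) :
    List String × PySem.Set String :=
  if acc.2.contains word then acc else (acc.1 ++ [word], PySem.Set.add acc.2 word)

-- counts[word] = counts.get(word, 0) + 1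
def pvCountsStep (counts : PySem.Dict String Int) (w : String) : PySem.Dict String Int :=
  counts.insert w (counts.getD w 0 + 1)

-- the per-class counting loop over train
def pvClassCounts (cls : String) (train : List (List String × String)) :
    PySem.Dict String Int :=
  train.foldl (fun counts p =>
    if p.2 == cls then (PySem.Set.ofList p.1).foldl pvCountsStep counts else counts)
    PySem.Dict.empty

def calculate_occs_words_alt (train : List (List String × String)) (smoothing : Int) :
    List (String × List (String × Int)) :=
  let vocab := (train.foldl (fun acc p => (PySem.Set.ofList p.1).foldl pvVocStep acc)
      (([], PySem.Set.empty) : List String × PySem.Set String)).1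
  let result := ["bad", "good"].foldl (fun r cls =>
      let counts := pvClassCounts cls train
      r.insert cls (vocab.foldl
        (fun d w => d.insert w (smoothing + counts.getD w 0)) PySem.Dict.empty))
    PySem.Dict.empty
  result.items.map (fun q => (q.1, q.2.items))

-- ===== PRECONDITION & SPEC =====
-- Pre_ excludes exactly the inputs where Python A raises KeyError: a pair whose example is
-- non-empty and whose gold class is neither "bad" nor "good".
def Pre_calculate_occs_words (train : List (List String × String)) (smoothing : Int) : Prop :=
  ∀ p ∈ train, p.1 = [] ∨ p.2 = "bad" ∨ p.2 = "good"
instance (train : List (List String × String)) (smoothing : Int) :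
    Decidable (Pre_calculate_occs_words train smoothing) := by
  unfold Pre_calculate_occs_words; infer_instance

def pvWitness_calculate_occs_words : (List (List String × String)) × Int :=
  ([(["a", "b"], "bad"), (["a"], "good"), ([], "skip")], 1)

def Spec_calculate_occs_words (train : List (List String × String)) (smoothing : Int)
    (out : List (String × List (String × Int))) : Prop :=
  out = calculate_occs_words_alt train smoothing
instance (train : List (List String × String)) (smoothing : Int)
    (out : List (String × List (String × Int))) :
    Decidable (Spec_calculate_occs_words train smoothing out) := by
  unfold Spec_calculate_occs_words; infer_instance

-- ===== CLAIM (what is proved, stated in full; the proofs are below) =====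
def Claim_equal_calculate_occs_words : Prop :=
  ∀ (train : List (List String × String)) (smoothing : Int),
    Dom_calculate_occs_words train smoothing →
    Pre_calculate_occs_words train smoothing →
    Spec_calculate_occs_words train smoothing (calculate_occs_words train smoothing)

-- ===== LEMMAS AND PROOFS =====

-- the two-key outer dict {"bad": b, "good": g}
def OD (b g : PySem.Dict String Int) : PySem.Dict String (PySem.Dict String Int) :=
  ⟨[("bad", b), ("good", g)]⟩

-- an inner dict whose keys are the list V and whose value at key u is F u
def mapD (V : List String) (F : String → Int) : PySem.Dict String Int :=
  ⟨V.map (fun w => (w, F w))⟩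

-- vocabulary after processing ts
def pvVocab (ts : List (List String × String)) : List String :=
  ts.foldl (fun v p => PySem.Set.update v (PySem.Set.ofList p.1)) PySem.Set.empty

-- number of examples of class gc containing word u
def pvCnt (gc : String) (ts : List (List String × String)) (u : String) : Int :=
  (ts.countP (fun p => decide (p.2 = gc ∧ u ∈ p.1)) : Nat)

lemma OD_getD_bad (b g x : PySem.Dict String Int) : (OD b g).getD "bad" x = b := by
  simp [OD, PySem.Dict.getD, PySem.Dict.get?]

lemma OD_getD_good (b g x : PySem.Dict String Int) : (OD b g).getD "good" x = g := by
  simp [OD, PySem.Dict.getD, PySem.Dict.get?]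

lemma OD_insert_bad (b g x : PySem.Dict String Int) : (OD b g).insert "bad" x = OD x g := by
  simp [OD, PySem.Dict.insert, PySem.Dict.contains]

lemma OD_insert_good (b g x : PySem.Dict String Int) : (OD b g).insert "good" x = OD b x := by
  simp [OD, PySem.Dict.insert, PySem.Dict.contains]

lemma OD_init (x y : PySem.Dict String Int) :
    (PySem.Dict.empty.insert "bad" x).insert "good" y = OD x y := by
  simp [OD, PySem.Dict.insert, PySem.Dict.contains, PySem.Dict.empty]

lemma OD_congr {b b' g g' : PySem.Dict String Int} (hb : b = b') (hg : g = g') :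
    OD b g = OD b' g' := by rw [hb, hg]

lemma mapD_contains (V : List String) (F : String → Int) (w : String) :
    (mapD V F).contains w = decide (w ∈ V) := by
  induction V with
  | nil => simp [mapD, PySem.Dict.contains]
  | cons v V ih =>
    simp only [mapD, PySem.Dict.contains] at ih ⊢
    simp only [List.map_cons, List.any_cons, ih, List.mem_cons]
    by_cases h : v = w
    · subst h; simp
    · simp [beq_iff_eq, h, (show ¬w = v from fun e => h e.symm)]

lemma mapD_getD (V : List String) (F : String → Int) (w : String) (d : Int) :
    (mapD V F).getD w d = if w ∈ V then F w else d := by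
  induction V with
  | nil => simp [mapD, PySem.Dict.getD, PySem.Dict.get?]
  | cons v V ih =>
    simp only [mapD, PySem.Dict.getD, PySem.Dict.get?] at ih ⊢
    by_cases h : v = w
    · simp [h, List.find?_cons_of_pos]
    · rw [List.map_cons, List.find?_cons_of_neg (by simpa using h)]
      rw [ih]
      simp [List.mem_cons, (show ¬w = v from fun e => h e.symm)]

lemma mapD_congr {V : List String} {F G : String → Int} (h : ∀ u ∈ V, F u = G u) :
    mapD V F = mapD V G :=
  congrArg PySem.Dict.mk (List.map_congr_left (fun u hu => by rw [h u hu]))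

lemma mapD_insert_mem {V : List String} {w : String} (h : w ∈ V) (F : String → Int) (x : Int) :
    (mapD V F).insert w x = mapD V (fun u => if u = w then x else F u) := by
  have hc : (mapD V F).contains w = true := by simp [mapD_contains, h]
  simp only [PySem.Dict.insert, hc, if_pos]
  show PySem.Dict.mk _ = _
  unfold mapD
  congr 1
  rw [List.map_map]
  apply List.map_congr_left
  intro u _
  by_cases huw : u = w <;> simp [huw]

lemma mapD_insert_not_mem {V : List String} {w : String} (h : w ∉ V) (F : String → Int) (x : Int) :
    (mapD V F).insert w x = mapD (V ++ [w]) (fun u => if u = w then x else F u) := by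
  have hc : (mapD V F).contains w = false := by simp [mapD_contains, h]
  simp only [PySem.Dict.insert, hc]
  show PySem.Dict.mk _ = _
  unfold mapD
  congr 1
  simp only [List.map_append, List.map_cons, List.map_nil]
  congr 1
  apply List.map_congr_left
  intro u hu
  have : u ≠ w := fun e => h (e ▸ hu)
  simp [this]

lemma update_eq_append_filter {L V : List String} (hL : L.Nodup) :
    PySem.Set.update V L = V ++ L.filter (fun u => decide (u ∉ V)) := by
  induction L generalizing V with
  | nil => simp [PySem.Set.update]
  | cons w rest ih =>
    obtain ⟨hw, hrest⟩ := List.nodup_cons.mp hL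
    have hstep : PySem.Set.update V (w :: rest) = PySem.Set.update (PySem.Set.add V w) rest := rfl
    by_cases hV : w ∈ V
    · rw [hstep, (show PySem.Set.add V w = V by simp [PySem.Set.add, PySem.Set.contains, hV]),
        ih hrest, List.filter_cons]
      simp [hV]
    · rw [hstep,
        (show PySem.Set.add V w = V ++ [w] by simp [PySem.Set.add, PySem.Set.contains, hV]),
        ih hrest, List.filter_cons]
      simp only [hV, not_false_iff, decide_true, if_pos, List.append_assoc,
        List.singleton_append]
      congr 2
      apply List.filter_congr
      intro u hu
      have : u ≠ w := fun e => hw (e ▸ hu)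
      simp [List.mem_append, this]

lemma foldl_update_nodup (ts : List (List String × String)) :
    ∀ (s : PySem.Set String), s.Nodup →
    (ts.foldl (fun v p => PySem.Set.update v (PySem.Set.ofList p.1)) s).Nodup := by
  induction ts with
  | nil => intro s h; simpa
  | cons p ts ih => intro s h; exact ih _ (PySem.Set.nodup_update _ _ h)

lemma pvVocab_nodup (ts : List (List String × String)) : (pvVocab ts).Nodup :=
  foldl_update_nodup ts _ List.nodup_nil

lemma mem_foldl_update (ts : List (List String × String)) {u : String} :
    ∀ (s : PySem.Set String), u ∈ s →
    u ∈ ts.foldl (fun v p => PySem.Set.update v (PySem.Set.ofList p.1)) s := by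
  induction ts with
  | nil => intro s h; simpa
  | cons q ts ih =>
    intro s h
    exact ih _ ((PySem.Set.mem_update _ _ _).mpr (Or.inl h))

lemma mem_pvVocab {u : String} {p : List String × String} {ts : List (List String × String)}
    (hp : p ∈ ts) (hu : u ∈ p.1) : u ∈ pvVocab ts := by
  unfold pvVocab
  generalize PySem.Set.empty = s
  induction ts generalizing s with
  | nil => cases hp
  | cons q ts ih =>
    rcases List.mem_cons.mp hp with h | h
    · subst h
      exact mem_foldl_update ts _
        ((PySem.Set.mem_update _ _ _).mpr (Or.inr ((PySem.Set.mem_ofList _ _).mpr hu)))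
    · exact ih h _

lemma pvCnt_eq_zero {gc u : String} {ts : List (List String × String)}
    (h : u ∉ pvVocab ts) : pvCnt gc ts u = 0 := by
  unfold pvCnt
  simp only [Nat.cast_eq_zero, List.countP_eq_zero]
  intro p hp
  simp only [decide_eq_true_eq, not_and]
  intro _ hu
  exact absurd (mem_pvVocab hp hu) h

lemma pvCnt_append (gc : String) (ts : List (List String × String))
    (p : List String × String) (u : String) :
    pvCnt gc (ts ++ [p]) u = pvCnt gc ts u + (if p.2 = gc ∧ u ∈ p.1 then 1 else 0) := by
  unfold pvCnt
  rw [List.countP_append]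
  push_cast
  congr 1
  simp only [List.countP_cons, List.countP_nil, Nat.zero_add]
  by_cases h : p.2 = gc ∧ u ∈ p.1 <;> simp [h]

lemma pvCnt_cons (gc : String) (p : List String × String)
    (ts : List (List String × String)) (u : String) :
    pvCnt gc (p :: ts) u = (if p.2 = gc ∧ u ∈ p.1 then 1 else 0) + pvCnt gc ts u := by
  unfold pvCnt
  rw [List.countP_cons]
  push_cast
  by_cases h : p.2 = gc ∧ u ∈ p.1 <;> simp [h] <;> ring

-- A's word step on a well-formed state
lemma Aword_mem {V : List String} {w : String} (h : w ∈ V) (sm : Int) (gc : String)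
    (hgc : gc = "bad" ∨ gc = "good") (B G : String → Int) :
    pvAword sm gc (OD (mapD V B) (mapD V G)) w =
      OD (mapD V (fun u => if u = w ∧ gc = "bad" then B u + 1 else B u))
         (mapD V (fun u => if u = w ∧ gc = "good" then G u + 1 else G u)) := by
  unfold pvAword
  simp only [OD_getD_bad, mapD_contains, h, decide_true, if_true]
  rcases hgc with h1 | h1 <;> subst h1
  · rw [OD_getD_bad, PySem.Dict.modify, mapD_getD, if_pos h, mapD_insert_mem h, OD_insert_bad]
    apply OD_congr
    · apply mapD_congr; intro u _
      by_cases huw : u = w <;> simp [huw]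
    · apply mapD_congr; intro u _; simp
  · rw [OD_getD_good, PySem.Dict.modify, mapD_getD, if_pos h, mapD_insert_mem h, OD_insert_good]
    apply OD_congr
    · apply mapD_congr; intro u _; simp
    · apply mapD_congr; intro u _
      by_cases huw : u = w <;> simp [huw]

lemma Aword_new {V : List String} {w : String} (h : w ∉ V) (sm : Int) (gc : String)
    (hgc : gc = "bad" ∨ gc = "good") (B G : String → Int) :
    pvAword sm gc (OD (mapD V B) (mapD V G)) w =
      OD (mapD (V ++ [w]) (fun u => if u = w then (if gc = "bad" then sm + 1 else sm) else B u))
         (mapD (V ++ [w]) (fun u => if u = w then (if gc = "good" then sm + 1 else sm) else G u)) := by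
  unfold pvAword
  simp only [OD_getD_bad, mapD_contains, h, decide_false, Bool.false_eq_true, if_false]
  rw [OD_insert_bad, OD_getD_good, OD_insert_good,
    mapD_insert_not_mem h B sm, mapD_insert_not_mem h G sm]
  have hmemw : w ∈ V ++ [w] := List.mem_append_right _ (List.mem_singleton.mpr rfl)
  rcases hgc with h1 | h1 <;> subst h1
  · rw [OD_getD_bad, PySem.Dict.modify, mapD_getD, if_pos hmemw, if_pos rfl,
      mapD_insert_mem hmemw, OD_insert_bad]
    apply OD_congr
    · apply mapD_congr; intro u _
      by_cases huw : u = w <;> simp [huw]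
    · apply mapD_congr; intro u _
      by_cases huw : u = w <;> simp [huw]
  · rw [OD_getD_good, PySem.Dict.modify, mapD_getD, if_pos hmemw, if_pos rfl,
      mapD_insert_mem hmemw, OD_insert_good]
    apply OD_congr
    · apply mapD_congr; intro u _
      by_cases huw : u = w <;> simp [huw]
    · apply mapD_congr; intro u _
      by_cases huw : u = w <;> simp [huw]

-- A's inner loop over the distinct words of one example
lemma Afold (sm : Int) (gc : String) (hgc : gc = "bad" ∨ gc = "good")
    (L : List String) (hL : L.Nodup) : ∀ (V : List String) (B G : String → Int),
    L.foldl (pvAword sm gc) (OD (mapD V B) (mapD V G)) =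
      OD (mapD (V ++ L.filter (fun u => decide (u ∉ V)))
            (fun u => (if u ∈ V then B u else sm) + (if u ∈ L ∧ gc = "bad" then 1 else 0)))
         (mapD (V ++ L.filter (fun u => decide (u ∉ V)))
            (fun u => (if u ∈ V then G u else sm) + (if u ∈ L ∧ gc = "good" then 1 else 0))) := by
  induction L with
  | nil =>
    intro V B G
    simp only [List.foldl_nil, List.filter_nil, List.append_nil]
    apply OD_congr <;> (apply mapD_congr; intro u hu; simp [hu])
  | cons w rest ih =>
    intro V B G
    obtain ⟨hw, hrest⟩ := List.nodup_cons.mp hL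
    by_cases hV : w ∈ V
    · rw [List.foldl_cons, Aword_mem hV sm gc hgc, ih hrest]
      have hfil : (w :: rest).filter (fun u => decide (u ∉ V)) =
          rest.filter (fun u => decide (u ∉ V)) := by
        rw [List.filter_cons]; simp [hV]
      rw [hfil]
      apply OD_congr <;> (apply mapD_congr; intro u hu)
      · by_cases huw : u = w
        · subst huw
          have hur : u ∉ rest := hw
          by_cases hb : gc = "bad" <;> simp [hb, hV, hur]
        · simp [huw, List.mem_cons]
      · by_cases huw : u = w
        · subst huw
          have hur : u ∉ rest := hw
          by_cases hg : gc = "good" <;> simp [hg, hV, hur]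
        · simp [huw, List.mem_cons]
    · rw [List.foldl_cons, Aword_new hV sm gc hgc, ih hrest]
      have hfil : rest.filter (fun u => decide (u ∉ V ++ [w])) =
          rest.filter (fun u => decide (u ∉ V)) := by
        apply List.filter_congr
        intro u hu
        have huw : u ≠ w := fun e => hw (e ▸ hu)
        simp [List.mem_append, huw]
      have hkeys : (V ++ [w]) ++ rest.filter (fun u => decide (u ∉ V ++ [w])) =
          V ++ (w :: rest).filter (fun u => decide (u ∉ V)) := by
        rw [hfil, List.filter_cons]
        simp [hV]
      rw [hkeys]
      apply OD_congr <;> (apply mapD_congr; intro u hu)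
      · by_cases huw : u = w
        · subst huw
          have hur : u ∉ rest := hw
          by_cases hb : gc = "bad" <;>
            simp [hb, hV, hur, List.mem_append, List.mem_cons]
        · have : (u ∈ V ++ [w]) = (u ∈ V) := by
            simp [List.mem_append, huw]
          simp [huw, this, List.mem_cons]
      · by_cases huw : u = w
        · subst huw
          have hur : u ∉ rest := hw
          by_cases hg : gc = "good" <;>
            simp [hg, hV, hur, List.mem_append, List.mem_cons]
        · have : (u ∈ V ++ [w]) = (u ∈ V) := by
            simp [List.mem_append, huw]
          simp [huw, this, List.mem_cons]

-- A's outer loop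
lemma Aouter (sm : Int) (ts : List (List String × String))
    (h : ∀ p ∈ ts, p.1 = [] ∨ p.2 = "bad" ∨ p.2 = "good") :
    ts.foldl (pvAex sm) (OD PySem.Dict.empty PySem.Dict.empty) =
      OD (mapD (pvVocab ts) (fun u => sm + pvCnt "bad" ts u))
         (mapD (pvVocab ts) (fun u => sm + pvCnt "good" ts u)) := by
  induction ts using List.reverseRecOn with
  | nil => rfl
  | append_singleton ts p ih =>
    have hts : ∀ q ∈ ts, q.1 = [] ∨ q.2 = "bad" ∨ q.2 = "good" := by
      intro q hq; exact h q (List.mem_append_left _ hq)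
    have hvoc : pvVocab (ts ++ [p]) =
        PySem.Set.update (pvVocab ts) (PySem.Set.ofList p.1) := by
      unfold pvVocab; rw [List.foldl_append]; rfl
    rw [List.foldl_append, ih hts, List.foldl_cons, List.foldl_nil]
    show pvAex sm _ p = _
    unfold pvAex
    rcases h p (List.mem_append_right _ (List.mem_singleton.mpr rfl)) with hnil | hgc
    · rw [hnil, hvoc, hnil]
      show OD _ _ = OD (mapD (PySem.Set.update (pvVocab ts) (PySem.Set.ofList [])) _)
        (mapD (PySem.Set.update (pvVocab ts) (PySem.Set.ofList [])) _)
      have hupd : PySem.Set.update (pvVocab ts) (PySem.Set.ofList ([] : List String)) =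
          pvVocab ts := rfl
      rw [hupd]
      apply OD_congr
      · apply mapD_congr; intro u _; rw [pvCnt_append]; simp [hnil]
      · apply mapD_congr; intro u _; rw [pvCnt_append]; simp [hnil]
    · rw [Afold sm p.2 hgc _ (PySem.Set.nodup_ofList p.1), hvoc,
        update_eq_append_filter (PySem.Set.nodup_ofList p.1)]
      apply OD_congr
      · apply mapD_congr
        intro u hu
        rw [pvCnt_append]
        rcases List.mem_append.mp hu with huV | huF
        · by_cases hb : p.2 = "bad" <;> by_cases hup : u ∈ p.1 <;>
            simp [huV, hb, hup, PySem.Set.mem_ofList] <;> ring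
        · have huL : u ∈ p.1 :=
            (PySem.Set.mem_ofList _ _).mp (List.mem_filter.mp huF).1
          have huV : u ∉ pvVocab ts := by simpa using (List.mem_filter.mp huF).2
          have hz : pvCnt "bad" ts u = 0 := pvCnt_eq_zero huV
          by_cases hb : p.2 = "bad" <;>
            simp [huV, huL, hz, hb, PySem.Set.mem_ofList]
      · apply mapD_congr
        intro u hu
        rw [pvCnt_append]
        rcases List.mem_append.mp hu with huV | huF
        · by_cases hg : p.2 = "good" <;> by_cases hup : u ∈ p.1 <;>
            simp [huV, hg, hup, PySem.Set.mem_ofList] <;> ring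
        · have huL : u ∈ p.1 :=
            (PySem.Set.mem_ofList _ _).mp (List.mem_filter.mp huF).1
          have huV : u ∉ pvVocab ts := by simpa using (List.mem_filter.mp huF).2
          have hz : pvCnt "good" ts u = 0 := pvCnt_eq_zero huV
          by_cases hg : p.2 = "good" <;>
            simp [huV, huL, hz, hg, PySem.Set.mem_ofList]

-- B pass 1: on a diagonal state (vocab = seen) the step is Set.add on both components
lemma vocStep_diag (L : List String) : ∀ (V : List String),
    L.foldl pvVocStep (V, V) = (PySem.Set.update V L, PySem.Set.update V L) := by
  induction L with
  | nil => intro V; rfl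
  | cons w L ih =>
    intro V
    have hstep : pvVocStep (V, V) w = (PySem.Set.add V w, PySem.Set.add V w) := by
      by_cases h : w ∈ V <;> simp [pvVocStep, PySem.Set.add, PySem.Set.contains, h]
    rw [List.foldl_cons, hstep, ih]
    rfl

lemma Bvocab (ts : List (List String × String)) : ∀ (V : List String),
    (ts.foldl (fun acc p => (PySem.Set.ofList p.1).foldl pvVocStep acc) (V, V)).1 =
      ts.foldl (fun v p => PySem.Set.update v (PySem.Set.ofList p.1)) V := by
  induction ts with
  | nil => intro V; rfl
  | cons p ts ih =>
    intro V
    rw [List.foldl_cons, List.foldl_cons, vocStep_diag]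
    exact ih _

-- B per-class counting: value of the counts dict at any word
lemma Bcounts_fold (gc : String) (ts : List (List String × String)) (u : String) :
    ∀ (d : PySem.Dict String Int),
    (ts.foldl (fun counts p =>
        if p.2 == gc then (PySem.Set.ofList p.1).foldl pvCountsStep counts else counts)
      d).getD u 0 = d.getD u 0 + pvCnt gc ts u := by
  induction ts with
  | nil => intro d; simp [pvCnt]
  | cons p ts ih =>
    intro d
    rw [List.foldl_cons, ih, pvCnt_cons]
    by_cases h : p.2 = gc
    · have hb : (p.2 == gc) = true := by simp [h]
      rw [hb, if_pos rfl]
      have hinner : ((PySem.Set.ofList p.1).foldl pvCountsStep d).getD u 0 =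
          d.getD u 0 + (PySem.Set.ofList p.1).count u := by
        exact PySem.Dict.getD_foldl_insert_add_one (PySem.Set.ofList p.1) d u
      rw [hinner]
      by_cases hu : u ∈ p.1
      · have hm : u ∈ PySem.Set.ofList p.1 := (PySem.Set.mem_ofList _ _).mpr hu
        rw [List.count_eq_one_of_mem (PySem.Set.nodup_ofList p.1) hm]
        simp [h, hu]
        try ring
      · have hm : u ∉ PySem.Set.ofList p.1 := fun hc => hu ((PySem.Set.mem_ofList _ _).mp hc)
        rw [List.count_eq_zero_of_not_mem hm]
        simp [h, hu]
    · have hb : (p.2 == gc) = false := by simp [h]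
      rw [hb]
      simp [h]

lemma Bcounts (gc : String) (ts : List (List String × String)) (u : String) :
    (pvClassCounts gc ts).getD u 0 = pvCnt gc ts u := by
  unfold pvClassCounts
  rw [Bcounts_fold]
  simp [PySem.Dict.getD_empty]

-- B assembly: folding insert over the nodup vocabulary from the empty dict is mapD
lemma Bassemble (V : List String) (hV : V.Nodup) (F : String → Int) :
    V.foldl (fun d w => d.insert w (F w)) PySem.Dict.empty = mapD V F := by
  induction V using List.reverseRecOn with
  | nil => rfl
  | append_singleton V w ih =>
    have hVn : V.Nodup := hV.sublist (List.sublist_append_left _ _)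
    have hwV : w ∉ V := by
      have h' := hV
      simp [List.nodup_append] at h'
      tauto
    rw [List.foldl_append, ih hVn, List.foldl_cons, List.foldl_nil,
      mapD_insert_not_mem hwV]
    apply mapD_congr; intro u _
    by_cases huw : u = w <;> simp [huw]

-- ===== VERDICT (by name: the statement is the Claim_ definition above) =====
theorem calculate_occs_words_spec : Claim_equal_calculate_occs_words := by
  intro train smoothing _hdom hpre
  unfold Spec_calculate_occs_words calculate_occs_words calculate_occs_words_alt
  have hA : train.foldl (pvAex smoothing)
      ((PySem.Dict.empty.insert "bad" PySem.Dict.empty).insert "good"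
        (PySem.Dict.empty : PySem.Dict String Int)) =
      OD (mapD (pvVocab train) (fun u => smoothing + pvCnt "bad" train u))
         (mapD (pvVocab train) (fun u => smoothing + pvCnt "good" train u)) := by
    rw [OD_init]
    exact Aouter smoothing train hpre
  have hvoc : (train.foldl (fun acc p => (PySem.Set.ofList p.1).foldl pvVocStep acc)
      (([], PySem.Set.empty) : List String × PySem.Set String)).1 = pvVocab train :=
    Bvocab train []
  have hB : (["bad", "good"].foldl (fun r cls =>
      r.insert cls ((train.foldl (fun acc p => (PySem.Set.ofList p.1).foldl pvVocStep acc)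
          (([], PySem.Set.empty) : List String × PySem.Set String)).1.foldl
        (fun d w => d.insert w (smoothing + (pvClassCounts cls train).getD w 0))
        PySem.Dict.empty))
      PySem.Dict.empty) =
      OD (mapD (pvVocab train) (fun u => smoothing + pvCnt "bad" train u))
         (mapD (pvVocab train) (fun u => smoothing + pvCnt "good" train u)) := by
    rw [List.foldl_cons, List.foldl_cons, List.foldl_nil]
    simp only [hvoc]
    rw [Bassemble _ (pvVocab_nodup train), Bassemble _ (pvVocab_nodup train),
      OD_init]
    apply OD_congr <;> (apply mapD_congr; intro u _; rw [Bcounts])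
  show (train.foldl (pvAex smoothing)
      ((PySem.Dict.empty.insert "bad" PySem.Dict.empty).insert "good"
        (PySem.Dict.empty : PySem.Dict String Int))).items.map (fun q => (q.1, q.2.items)) =
    (["bad", "good"].foldl (fun r cls =>
        r.insert cls ((train.foldl (fun acc p => (PySem.Set.ofList p.1).foldl pvVocStep acc)
            (([], PySem.Set.empty) : List String × PySem.Set String)).1.foldl
          (fun d w => d.insert w (smoothing + (pvClassCounts cls train).getD w 0))
          PySem.Dict.empty))
      PySem.Dict.empty).items.map (fun q => (q.1, q.2.items))
  rw [hA, hB]
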